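-- pv_equiv track=rewrite | github.com/xizsmin/TIL | Algorithm/201025/1609. Even Odd Tree.py | strictlyEvenDecreasing
-- ===== SOURCE A (Python) =====
-- def strictlyEvenDecreasing(l: list) -> bool:
--     if l[0] % 2 == 1:
--         return False
--     for i in range(1, len(l)):
--         if l[i] %2 == 1:
--             return False
--         if l[i] >= l[i-1]:
--             return False
--     return True
-- ===== SOURCE B (Python) =====
-- def strictlyEvenDecreasing(l: list) -> bool:
--     return (sum(x % 2 for x in l) == 0
--             and len(set(l)) == len(l)
--             and sorted(l, reverse=True) == l)
-- ===== Notes on version B (the rewrite author's own statement) =====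
-- stated objective: alternative
-- what changed: Replaces A's fused early-returning index loop with a global characterization: the parity-sum of all elements is zero, the set of elements has the same size as the list (no duplicates), and the list equals its own descending sort.
import Mathlib
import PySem

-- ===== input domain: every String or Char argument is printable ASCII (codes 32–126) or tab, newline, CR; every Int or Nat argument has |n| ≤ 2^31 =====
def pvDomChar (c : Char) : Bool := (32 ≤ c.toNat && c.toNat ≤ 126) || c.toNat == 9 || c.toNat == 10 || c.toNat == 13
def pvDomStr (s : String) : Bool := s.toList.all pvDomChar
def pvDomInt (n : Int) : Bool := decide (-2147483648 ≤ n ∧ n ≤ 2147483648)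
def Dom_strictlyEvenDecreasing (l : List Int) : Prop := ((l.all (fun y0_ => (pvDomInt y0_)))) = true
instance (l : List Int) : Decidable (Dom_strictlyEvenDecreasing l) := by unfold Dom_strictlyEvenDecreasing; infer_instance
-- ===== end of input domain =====

-- B replaces A's fused early-returning index loop by a set/sort-based characterization (parity-sum zero, len(set(l)) == len(l), l equal to its own descending sort); equivalence proved for nonempty lists (A raises IndexError on the empty list, where B returns True).


-- ===== PORT A =====
-- A's for-loop over range(1, len(l)) checks the current element's parity and compares it
-- with the previous one; ported as structural recursion carrying prev = the previous element.
def pvLoopA (prev : Int) : List Int → Bool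
  | [] => true
  | x :: rest =>
    if PySem.Int.mod x 2 == 1 then false
    else if x ≥ prev then false
    else pvLoopA x rest

def strictlyEvenDecreasing (l : List Int) : Bool :=
  match l with
  | [] => false   -- unreachable under Pre_: Python raises IndexError indexing the first element
  | h :: t => if PySem.Int.mod h 2 == 1 then false else pvLoopA h t

-- ===== PORT B =====
-- Source B: sum(x % 2 for x in l) == 0 and len(set(l)) == len(l) and sorted(l, reverse=True) == l
def strictlyEvenDecreasing_alt (l : List Int) : Bool :=
  ((l.map (fun x => PySem.Int.mod x 2)).sum == 0)
  && ((PySem.Set.ofList l).length == l.length)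
  && (PySem.List.sorted l (fun x => x) true == l)

-- ===== PRECONDITION & SPEC =====
-- Pre_ excludes only the empty list, on which A raises IndexError indexing the first element.
def Pre_strictlyEvenDecreasing (l : List Int) : Prop := l ≠ []
instance (l : List Int) : Decidable (Pre_strictlyEvenDecreasing l) := by unfold Pre_strictlyEvenDecreasing; infer_instance
def pvWitness_strictlyEvenDecreasing : List Int := [4, 2]

def Spec_strictlyEvenDecreasing (l : List Int) (out : Bool) : Prop := out = strictlyEvenDecreasing_alt l
instance (l : List Int) (out : Bool) : Decidable (Spec_strictlyEvenDecreasing l out) := by unfold Spec_strictlyEvenDecreasing; infer_instance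

-- ===== CLAIM (what is proved, stated in full; the proofs are below) =====
def Claim_equal_strictlyEvenDecreasing : Prop := ∀ (l : List Int), Dom_strictlyEvenDecreasing l → Pre_strictlyEvenDecreasing l → Spec_strictlyEvenDecreasing l (strictlyEvenDecreasing l)

-- ===== LEMMAS AND PROOFS =====
-- sum(x % 2 for x in l) == 0 means every element is even (each Python mod is 0 or 1)
theorem pvSumMod_eq_zero_iff (l : List Int) :
    (l.map (fun x => PySem.Int.mod x 2)).sum = 0 ↔ ∀ x ∈ l, PySem.Int.mod x 2 = 0 := by
  induction l with
  | nil => simp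
  | cons x t ih =>
    have hx : 0 ≤ PySem.Int.mod x 2 := PySem.Int.mod_nonneg x (by omega)
    have ht : 0 ≤ (t.map (fun x => PySem.Int.mod x 2)).sum := by
      apply List.sum_nonneg; intro y hy
      simp only [List.mem_map] at hy
      obtain ⟨z, _, rfl⟩ := hy
      exact PySem.Int.mod_nonneg z (by omega)
    simp only [List.map_cons, List.sum_cons, List.mem_cons]
    constructor
    · intro h
      have h2 := ih.mp (by omega)
      rintro y (rfl | hy)
      · omega
      · exact h2 y hy
    · intro h
      have h1 := h x (Or.inl rfl)
      have h2 := ih.mpr (fun y hy => h y (Or.inr hy))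
      omega

-- len(set(l)) == len(l) is exactly Nodup
theorem pvOfListLen_iff (l : List Int) :
    (PySem.Set.ofList l).length = l.length ↔ l.Nodup := by
  constructor
  · intro h
    induction l with
    | nil => exact List.nodup_nil
    | cons x t ih =>
      rw [PySem.Set.ofList_cons] at h
      simp only [List.length_cons] at h
      by_cases hx : x ∈ t
      · exfalso
        have h1 : (PySem.Set.discard (PySem.Set.ofList t) x).length < (PySem.Set.ofList t).length := by
          apply List.length_filter_lt_length_iff_exists.mpr
          exact ⟨x, (PySem.Set.mem_ofList t x).mpr hx, by simp⟩
        have h2 := PySem.Set.length_ofList_le t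
        omega
      · have hlen : (PySem.Set.discard (PySem.Set.ofList t) x).length = (PySem.Set.ofList t).length := by
          apply List.length_filter_eq_length_iff.mpr
          intro y hy
          have hne : y ≠ x := fun he => hx (he ▸ (PySem.Set.mem_ofList t y).mp hy)
          simp [hne]
        rw [hlen] at h
        exact List.nodup_cons.mpr ⟨hx, ih (by omega)⟩
  · intro h
    rw [PySem.Set.ofList_eq_self_of_nodup l h]

-- on a duplicate-free list, sorted(l, reverse=True) == l is exactly strict decrease
theorem pvSortedRev_iff (l : List Int) (hnd : l.Nodup) :
    PySem.List.sorted l (fun x => x) true = l ↔ l.Pairwise (· > ·) := by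
  constructor
  · intro h
    have hp : l.Pairwise (fun a b => b ≤ a) := by
      have := PySem.List.sorted_pairwise_rev (xs := l) (key := fun x => x)
      rwa [h] at this
    exact (hp.and hnd).imp (fun hab => lt_of_le_of_ne hab.1 (Ne.symm hab.2))
  · intro h
    exact PySem.List.sorted_rev_eq_self_of_pairwise l (fun x => x) (h.imp le_of_lt)

theorem pvPairwise_cons_cons (prev x : Int) (rest : List Int) :
    List.Pairwise (· > ·) (prev :: x :: rest) ↔ x < prev ∧ List.Pairwise (· > ·) (x :: rest) := by
  constructor
  · intro h
    rw [List.pairwise_cons] at h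
    exact ⟨h.1 x (by simp), h.2⟩
  · rintro ⟨hlt, hp⟩
    rw [List.pairwise_cons]
    refine ⟨?_, hp⟩
    intro y hy
    simp only [List.mem_cons] at hy
    rcases hy with rfl | hy
    · exact hlt
    · exact lt_trans ((List.pairwise_cons.mp hp).1 y hy) hlt

-- what A's loop computes: all elements even and strictly below their predecessor
theorem pvLoopA_iff (prev : Int) (t : List Int) :
    pvLoopA prev t = true ↔ (∀ x ∈ t, PySem.Int.mod x 2 = 0) ∧ List.Pairwise (· > ·) (prev :: t) := by
  induction t generalizing prev with
  | nil => simp [pvLoopA]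
  | cons x rest ih =>
    have hm := PySem.Int.mod_two_eq x
    have hunf : pvLoopA prev (x :: rest)
        = if (PySem.Int.mod x 2 == 1) = true then false
          else if x ≥ prev then false else pvLoopA x rest := rfl
    rw [hunf, pvPairwise_cons_cons]
    by_cases h1 : PySem.Int.mod x 2 = 1
    · rw [if_pos (by simp only [beq_iff_eq]; exact h1)]
      refine iff_of_false (by decide) ?_
      rintro ⟨hev, -⟩
      have := hev x (by simp)
      omega
    · rw [if_neg (by simp only [beq_iff_eq]; exact h1)]
      have hx0 : PySem.Int.mod x 2 = 0 := by omega
      by_cases h2 : x ≥ prev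
      · rw [if_pos h2]
        refine iff_of_false (by decide) ?_
        rintro ⟨-, hlt, -⟩
        omega
      · rw [if_neg h2, ih]
        constructor
        · rintro ⟨hev, hpw⟩
          refine ⟨?_, by omega, hpw⟩
          intro y hy
          rcases List.mem_cons.mp hy with rfl | hy
          · exact hx0
          · exact hev y hy
        · rintro ⟨hev, -, hpw⟩
          exact ⟨fun y hy => hev y (List.mem_cons_of_mem _ hy), hpw⟩

-- ===== VERDICT (by name: the statement is the Claim_ definition above) =====
theorem strictlyEvenDecreasing_spec : Claim_equal_strictlyEvenDecreasing := by
  intro l _ hpre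
  match l with
  | [] => exact absurd rfl hpre
  | h :: t =>
    show strictlyEvenDecreasing (h :: t) = strictlyEvenDecreasing_alt (h :: t)
    rw [Bool.eq_iff_iff]
    have hmh := PySem.Int.mod_two_eq h
    constructor
    · intro hA
      rw [show strictlyEvenDecreasing (h :: t)
            = if (PySem.Int.mod h 2 == 1) = true then false else pvLoopA h t from rfl] at hA
      by_cases h1 : PySem.Int.mod h 2 = 1
      case pos =>
        rw [if_pos (by simp only [beq_iff_eq]; exact h1)] at hA
        exact absurd hA (by decide)
      rw [if_neg (by simp only [beq_iff_eq]; exact h1)] at hA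
      have hL : pvLoopA h t = true := hA
      obtain ⟨heven, hpw⟩ := (pvLoopA_iff h t).mp hL
      have hall : ∀ x ∈ h :: t, PySem.Int.mod x 2 = 0 := by
        intro x hx
        rcases List.mem_cons.mp hx with rfl | hx
        · omega
        · exact heven x hx
      have hnd : (h :: t).Nodup := hpw.imp ne_of_gt
      simp only [strictlyEvenDecreasing_alt, Bool.and_eq_true, beq_iff_eq]
      exact ⟨⟨(pvSumMod_eq_zero_iff _).mpr hall, (pvOfListLen_iff _).mpr hnd⟩,
             (pvSortedRev_iff _ hnd).mpr hpw⟩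
    · intro hB
      simp only [strictlyEvenDecreasing_alt, Bool.and_eq_true, beq_iff_eq] at hB
      obtain ⟨⟨hsum, hlen⟩, hsort⟩ := hB
      have hall := (pvSumMod_eq_zero_iff _).mp hsum
      have hnd := (pvOfListLen_iff _).mp hlen
      have hpw := (pvSortedRev_iff _ hnd).mp hsort
      have h1 : PySem.Int.mod h 2 ≠ 1 := by
        have := hall h (by simp)
        have hm := PySem.Int.mod_two_eq h
        omega
      rw [show strictlyEvenDecreasing (h :: t)
            = if (PySem.Int.mod h 2 == 1) = true then false else pvLoopA h t from rfl,
         if_neg (by simp only [beq_iff_eq]; exact h1)]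
      exact (pvLoopA_iff h t).mpr ⟨fun x hx => hall x (List.mem_cons_of_mem _ hx), hpw⟩
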